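-- pv_equiv track=rewrite | github.com/xhr66668888/SAE-Medical-Concept-Axis-Experiment | sae_med/data_utils.py | balanced_take
-- ===== SOURCE A (Python) =====
-- def balanced_take(rows: list[dict[str, str]], label_column: str, labels: tuple[str, str], max_per_label: int | None):
--     selected: list[dict[str, str]] = []
--     for label in labels:
--         group = [row for row in rows if row.get(label_column) == label]
--         if max_per_label is not None:
--             group = group[:max_per_label]
--         selected.extend(group)
--     return selected
-- ===== SOURCE B (Python) =====
-- def balanced_take(rows: list[dict[str, str]], label_column: str, labels: tuple[str, str], max_per_label: int | None):
--     groups: dict = {}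
--     for row in rows:
--         groups.setdefault(row.get(label_column), []).append(row)
--     return [row for label in labels for row in groups.get(label, [])[:max_per_label]]
-- ===== Notes on version B (the rewrite author's own statement) =====
-- stated objective: alternative
-- what changed: B makes one grouping pass that builds a dict label->rows (setdefault/append), then emits each requested label's group with the cap, instead of A's separate filtering scan over all rows per label.
import Mathlib
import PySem

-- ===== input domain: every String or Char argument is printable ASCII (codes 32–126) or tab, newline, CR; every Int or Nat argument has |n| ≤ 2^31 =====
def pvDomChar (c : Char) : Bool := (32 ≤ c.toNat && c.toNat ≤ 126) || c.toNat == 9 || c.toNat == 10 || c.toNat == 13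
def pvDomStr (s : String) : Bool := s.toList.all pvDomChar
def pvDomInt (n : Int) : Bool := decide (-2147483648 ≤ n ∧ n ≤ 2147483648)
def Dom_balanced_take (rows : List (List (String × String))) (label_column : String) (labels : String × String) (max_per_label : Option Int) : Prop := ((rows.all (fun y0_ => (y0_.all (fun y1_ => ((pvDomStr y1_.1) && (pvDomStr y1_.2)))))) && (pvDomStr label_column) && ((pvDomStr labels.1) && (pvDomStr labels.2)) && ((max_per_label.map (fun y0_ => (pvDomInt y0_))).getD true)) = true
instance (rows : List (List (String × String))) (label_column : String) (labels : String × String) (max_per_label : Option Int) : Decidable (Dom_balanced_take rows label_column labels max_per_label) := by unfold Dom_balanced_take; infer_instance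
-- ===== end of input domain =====

-- B replaces A's per-label filtering scans with one dict-grouping pass plus a flat emission over the requested labels (alternative decomposition, same cost).


-- ===== PORT A =====
def balanced_take (rows : List (List (String × String))) (label_column : String) (labels : String × String) (max_per_label : Option Int) : List (List (String × String)) :=
  [labels.1, labels.2].foldl (fun selected label =>
    let group := rows.filter (fun row => (PySem.Dict.mk row).get? label_column == some label)
    let group := match max_per_label with
      | none => group
      | some m => PySem.List.slice group none (some m)
    selected ++ group) []

-- ===== PORT B =====
def balanced_take_alt (rows : List (List (String × String))) (label_column : String) (labels : String × String) (max_per_label : Option Int) : List (List (String × String)) :=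
  let groups := rows.foldl (fun d row => d.modify ((PySem.Dict.mk row).get? label_column) [] (· ++ [row])) PySem.Dict.empty
  [labels.1, labels.2].flatMap (fun label => PySem.List.slice (groups.getD (some label) []) none max_per_label)

-- ===== PRECONDITION & SPEC =====
def Spec_balanced_take (rows : List (List (String × String))) (label_column : String) (labels : String × String) (max_per_label : Option Int) (out : List (List (String × String))) : Prop := out = balanced_take_alt rows label_column labels max_per_label
instance (rows : List (List (String × String))) (label_column : String) (labels : String × String) (max_per_label : Option Int) (out : List (List (String × String))) : Decidable (Spec_balanced_take rows label_column labels max_per_label out) := by unfold Spec_balanced_take; infer_instance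

-- ===== CLAIM (what is proved, stated in full; the proofs are below) =====
def Claim_equal_balanced_take : Prop := ∀ (rows : List (List (String × String))) (label_column : String) (labels : String × String) (max_per_label : Option Int), Dom_balanced_take rows label_column labels max_per_label → Spec_balanced_take rows label_column labels max_per_label (balanced_take rows label_column labels max_per_label)

-- ===== LEMMAS AND PROOFS =====
-- the grouping dict built by B's single pass, looked up at a label, is exactly A's filtered group
theorem groups_getD (rows : List (List (String × String))) (label_column : String) (label : String) :
    (rows.foldl (fun d row => d.modify ((PySem.Dict.mk row).get? label_column) [] (· ++ [row])) PySem.Dict.empty).getD (some label) []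
      = rows.filter (fun row => (PySem.Dict.mk row).get? label_column == some label) := by
  have h := PySem.Dict.getD_foldl_modify_append
    (l := rows.map (fun row => ((PySem.Dict.mk row).get? label_column, row)))
    (d := (PySem.Dict.empty : PySem.Dict (Option String) (List (List (String × String)))))
    (c := some label)
  simp only [List.foldl_map] at h
  simpa [List.filter_map, Function.comp_def, List.map_map] using h

-- ===== VERDICT (by name: the statement is the Claim_ definition above) =====
theorem balanced_take_spec : Claim_equal_balanced_take := by
  intro rows label_column labels max_per_label _
  unfold Spec_balanced_take balanced_take balanced_take_alt
  simp only [groups_getD]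
  cases max_per_label <;>
    simp [List.flatMap_cons, PySem.List.slice_none_none]
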